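-- pv_equiv track=rewrite | github.com/aceiii/advent-of-code-2019 | day4.py | match_rules2
-- ===== SOURCE A (Python) =====
-- def match_rules2(val):
--     digits = list(map(int, str(val)))
--     digit_count = {}
--     digit_count[digits[0]] = 1
--
--     for index in range(1, len(digits)):
--         current = digits[index]
--         previous = digits[index - 1]
--         if current < previous:
--             return False
--         elif previous == current:
--             digit_count[current] += 1
--         else:
--             digit_count[current] = 1
--
--     return 2 in digit_count.values()
-- ===== SOURCE B (Python) =====
-- from itertools import groupby
--
-- def match_rules2(val):
--     digits = list(map(int, str(val)))
--     if not all(a <= b for a, b in zip(digits, digits[1:])):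
--         return False
--     return 2 in (sum(1 for _ in g) for _, g in groupby(digits))
-- ===== Notes on version B (the rewrite author's own statement) =====
-- stated objective: idiomatic
-- what changed: A's single fused loop with an early return and a maintained run-count dict is replaced by two separate passes: an all/zip adjacent-pair non-decreasing check, then itertools.groupby run lengths tested for a length of exactly 2.
import Mathlib
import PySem

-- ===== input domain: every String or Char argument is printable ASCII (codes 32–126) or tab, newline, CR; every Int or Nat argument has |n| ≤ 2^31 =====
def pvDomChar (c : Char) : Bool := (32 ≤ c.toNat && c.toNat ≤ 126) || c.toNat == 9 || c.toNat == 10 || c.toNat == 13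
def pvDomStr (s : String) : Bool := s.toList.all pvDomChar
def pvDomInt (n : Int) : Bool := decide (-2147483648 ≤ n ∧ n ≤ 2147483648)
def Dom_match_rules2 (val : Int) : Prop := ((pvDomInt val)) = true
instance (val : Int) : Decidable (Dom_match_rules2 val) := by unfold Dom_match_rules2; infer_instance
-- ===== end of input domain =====

-- B replaces A's fused early-return loop + run-count dict by two plain passes
-- (adjacent-pair non-decreasing check, then groupby run lengths); objective: idiomatic.

-- ===== PORT A =====
-- int(c) of a single character of str(val); exact for digit chars (the '-' of a
-- negative val makes Python raise ValueError, excluded by Pre_, where getD 0 is a dummy).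
def pvDigitsOf (val : Int) : List Int :=
  (PySem.Int.toChars val).map (fun c => (PySem.Int.ofChars? [c]).getD 0)

-- A's for-loop over range(1, len(digits)): structural recursion carrying the
-- previous digit and the same dict state; branches in A's order.
def pvALoop (prev : Int) (rest : List Int) (d : PySem.Dict Int Int) : Bool :=
  match rest with
  | [] => d.values.contains 2
  | current :: rest' =>
    if current < prev then false
    else if prev == current then
      pvALoop current rest' (d.insert current (d.getD current 0 + 1))
    else
      pvALoop current rest' (d.insert current 1)

def match_rules2 (val : Int) : Bool :=
  let digits := pvDigitsOf val
  match digits with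
  | [] => false  -- unreachable: str(val) is nonempty (digits[0] would be IndexError)
  | d0 :: rest => pvALoop d0 rest (PySem.Dict.empty.insert d0 1)

-- ===== PORT B =====
-- run lengths of itertools.groupby(digits)
def pvRlGo (cur cnt : Int) : List Int → List Int
  | [] => [cnt]
  | y :: ys => if y == cur then pvRlGo cur (cnt + 1) ys else cnt :: pvRlGo y 1 ys

def pvRunLengths : List Int → List Int
  | [] => []
  | x :: xs => pvRlGo x 1 xs

def match_rules2_alt (val : Int) : Bool :=
  let digits := pvDigitsOf val
  if (digits.zip digits.tail).all (fun p => p.1 ≤ p.2) then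
    (pvRunLengths digits).contains 2
  else false

-- ===== PRECONDITION & SPEC =====
-- Pre_ excludes exactly negative val, on which Python A raises ValueError
-- (int('-') while mapping int over str(val)).
def Pre_match_rules2 (val : Int) : Prop := 0 ≤ val
instance (val : Int) : Decidable (Pre_match_rules2 val) := by unfold Pre_match_rules2; infer_instance
def pvWitness_match_rules2 : Int := (122)

def Spec_match_rules2 (val : Int) (out : Bool) : Prop := out = match_rules2_alt val
instance (val : Int) (out : Bool) : Decidable (Spec_match_rules2 val out) := by unfold Spec_match_rules2; infer_instance

-- ===== CLAIM (what is proved, stated in full; the proofs are below) =====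
def Claim_equal_match_rules2 : Prop := ∀ (val : Int), Dom_match_rules2 val → Pre_match_rules2 val → Spec_match_rules2 val (match_rules2 val)

-- ===== LEMMAS AND PROOFS =====

-- Invariant-carrying equivalence of A's fused loop with B's two passes:
-- d's items are the completed runs (values `pre.map (·.2)`) plus the current run
-- (prev, cnt) last, keys nodup and all ≤ prev.
theorem pvALoop_eq (rest : List Int) : ∀ (prev cnt : Int) (pre : List (Int × Int))
    (d : PySem.Dict Int Int),
    d.items = pre ++ [(prev, cnt)] →
    d.keys.Nodup →
    (∀ p ∈ d.items, p.1 ≤ prev) →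
    pvALoop prev rest d =
      (if ((prev :: rest).zip rest).all (fun p => p.1 ≤ p.2) then
        (pre.map (·.2) ++ pvRlGo prev cnt rest).contains 2
      else false) := by
  induction rest with
  | nil =>
    intro prev cnt pre d hitems hnd hle
    simp [pvALoop, pvRlGo, PySem.Dict.values, hitems]
  | cons c rest' ih =>
    intro prev cnt pre d hitems hnd hle
    by_cases hlt : c < prev
    · simp [pvALoop, hlt, not_le.mpr hlt]
    · by_cases heq : prev = c
      · subst heq
        have hget : d.getD prev 0 = cnt :=
          PySem.Dict.getD_of_mem_items d (by rw [hitems]; simp) hnd 0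
        have hcontains : d.contains prev = true := by
          rw [PySem.Dict.contains_eq_decide_mem_keys]
          simp [PySem.Dict.keys, hitems]
        have hpre : ∀ p ∈ pre, (p.1 == prev) = false := by
          intro p hp
          have hnm : prev ∉ pre.map Prod.fst := by
            rcases List.nodup_append.mp (by
              have h2 := hnd
              rw [PySem.Dict.keys, hitems, List.map_append] at h2
              simpa using h2) with ⟨-, -, hdisj⟩
            intro hmem
            exact hdisj prev hmem prev (by simp) rfl
          simp only [beq_eq_false_iff_ne, ne_eq]
          intro hpe
          exact hnm (hpe ▸ List.mem_map_of_mem hp)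
        have hitems' : (d.insert prev (cnt + 1)).items = pre ++ [(prev, cnt + 1)] := by
          rw [PySem.Dict.items_insert_of_contains d _ hcontains, hitems, List.map_append]
          congr 1
          · rw [List.map_congr_left (fun p hp => by simp [hpre p hp] :
              ∀ p ∈ pre, (if (p.1 == prev) = true then (prev, cnt + 1) else p) = id p)]
            exact List.map_id pre
          · simp
        have hnd' : (d.insert prev (cnt + 1)).keys.Nodup := by
          rw [PySem.Dict.keys, hitems', List.map_append]
          have h2 := hnd
          rw [PySem.Dict.keys, hitems, List.map_append] at h2
          simpa using h2
        have hle' : ∀ p ∈ (d.insert prev (cnt + 1)).items, p.1 ≤ prev := by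
          intro p hp
          rw [hitems'] at hp
          rcases List.mem_append.mp hp with h | h
          · exact hle p (by rw [hitems]; exact List.mem_append_left _ h)
          · simp at h; simp [h]
        rw [show pvALoop prev (prev :: rest') d
              = pvALoop prev rest' (d.insert prev (d.getD prev 0 + 1)) from by
            simp [pvALoop]]
        rw [hget, ih prev (cnt + 1) pre _ hitems' hnd' hle']
        simp [pvRlGo]
      · -- prev < c : new run
        have hpc : prev < c := lt_of_le_of_ne (not_lt.mp hlt) heq
        have hnotmem : c ∉ d.keys := by
          intro hmem
          rw [PySem.Dict.keys] at hmem
          rcases List.mem_map.mp hmem with ⟨p, hp, hpe⟩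
          exact absurd (hpe ▸ hle p hp) (not_le.mpr hpc)
        have hcontains : d.contains c = false := by
          rw [PySem.Dict.contains_eq_decide_mem_keys]
          simpa using hnotmem
        have hitems' : (d.insert c 1).items = (pre ++ [(prev, cnt)]) ++ [(c, 1)] := by
          rw [PySem.Dict.items_insert_of_not_contains d _ hcontains, hitems]
        have hnd' : (d.insert c 1).keys.Nodup := by
          rw [PySem.Dict.keys, hitems', List.map_append, List.nodup_append]
          refine ⟨by rw [PySem.Dict.keys, hitems] at hnd; exact hnd, by simp, ?_⟩
          intro a ha b hb heqab
          simp at hb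
          subst hb; subst heqab
          exact hnotmem (by rw [PySem.Dict.keys, hitems]; exact ha)
        have hle' : ∀ p ∈ (d.insert c 1).items, p.1 ≤ c := by
          intro p hp
          rw [hitems'] at hp
          rcases List.mem_append.mp hp with h | h
          · exact le_of_lt (lt_of_le_of_lt (hle p (hitems ▸ h)) hpc)
          · simp at h; simp [h]
        rw [show pvALoop prev (c :: rest') d = pvALoop c rest' (d.insert c 1) by
            simp [pvALoop, hlt, heq]]
        rw [ih c 1 (pre ++ [(prev, cnt)]) _ hitems' hnd' hle']
        have hne : (c == prev) = false := by simp [Ne.symm heq]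
        simp [pvRlGo, hne, le_of_lt hpc]

-- ===== VERDICT (by name: the statement is the Claim_ definition above) =====
theorem match_rules2_spec : Claim_equal_match_rules2 := by
  intro val _ _
  unfold Spec_match_rules2 match_rules2 match_rules2_alt
  cases hds : pvDigitsOf val with
  | nil => simp [pvRunLengths]
  | cons d0 rest =>
    have hitems : (PySem.Dict.empty.insert d0 (1:Int)).items = [] ++ [(d0, 1)] := by
      rw [PySem.Dict.items_insert_of_not_contains _ _ (PySem.Dict.contains_empty d0)]
      simp [PySem.Dict.empty]
    dsimp only
    rw [pvALoop_eq rest d0 1 [] _ hitems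
      (by rw [PySem.Dict.keys, hitems]; simp)
      (by intro p hp; rw [hitems] at hp; simp at hp; simp [hp])]
    simp [pvRunLengths]
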